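-- pv_equiv track=rewrite | github.com/ZAWYAAA/DriveGuardian-IA | src/stats_table.py | count_episodes
-- ===== SOURCE A (Python) =====
-- def count_episodes(series, target):
--     prev = None
--     episodes = 0
--     for v in series:
--         if v == target and prev != target:
--             episodes += 1
--         prev = v
--     return episodes
-- ===== SOURCE B (Python) =====
-- def count_episodes(series, target):
--     hits = series.count(target)
--     adjacent = sum(1 for a, b in zip(series, series[1:]) if a == target and b == target)
--     return hits - adjacent
-- ===== Notes on version B (the rewrite author's own statement) =====
-- stated objective: alternative
-- what changed: Replaced the prev-accumulator transition scan by an arithmetic identity: episodes = (occurrences of target) - (adjacent pairs that are both target), computed with series.count plus a zip over the shifted list; each run of length k contributes k hits and k-1 adjacent pairs, so the difference counts runs.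
import Mathlib
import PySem

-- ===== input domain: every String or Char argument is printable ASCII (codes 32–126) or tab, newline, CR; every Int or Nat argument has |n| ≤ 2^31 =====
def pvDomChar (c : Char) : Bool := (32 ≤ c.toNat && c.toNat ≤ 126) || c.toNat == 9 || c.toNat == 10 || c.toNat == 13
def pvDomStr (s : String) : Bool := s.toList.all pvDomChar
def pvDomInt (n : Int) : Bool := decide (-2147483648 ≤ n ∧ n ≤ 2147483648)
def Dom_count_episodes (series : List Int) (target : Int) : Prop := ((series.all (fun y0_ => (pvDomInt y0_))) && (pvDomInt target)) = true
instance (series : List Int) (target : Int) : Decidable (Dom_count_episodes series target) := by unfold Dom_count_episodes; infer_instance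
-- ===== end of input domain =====

-- B replaces A's prev-accumulator transition scan with an arithmetic identity:
-- episodes = (occurrences of target) - (adjacent pairs both equal to target).
-- ===== PORT A =====
-- literal port of A's loop: state (prev, episodes), prev starts as None
def countEpLoop (target : Int) : List Int → Option Int → Int → Int
  | [], _, episodes => episodes
  | v :: rest, prev, episodes =>
      countEpLoop target rest (some v)
        (if v = target ∧ prev ≠ some target then episodes + 1 else episodes)

def count_episodes (series : List Int) (target : Int) : Int :=
  countEpLoop target series none 0

-- ===== PORT B =====
-- hits = series.count(target); adjacent = sum over zip(series, series[1:]) of both-equal-target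
def count_episodes_alt (series : List Int) (target : Int) : Int :=
  let hits : Int := (series.count target : Int)
  let adjacent : Int :=
    ((series.zip (PySem.List.slice series (some 1) none)).countP
      (fun p => p.1 == target && p.2 == target) : Int)
  hits - adjacent

-- ===== PRECONDITION & SPEC =====
def Spec_count_episodes (series : List Int) (target : Int) (out : Int) : Prop := out = count_episodes_alt series target
instance (series : List Int) (target : Int) (out : Int) : Decidable (Spec_count_episodes series target out) := by unfold Spec_count_episodes; infer_instance

-- ===== CLAIM (what is proved, stated in full; the proofs are below) =====
def Claim_equal_count_episodes : Prop := ∀ (series : List Int) (target : Int), Dom_count_episodes series target → Spec_count_episodes series target (count_episodes series target)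

-- ===== LEMMAS AND PROOFS =====

lemma slice_one_eq_tail (xs : List Int) :
    PySem.List.slice xs (some 1) none = xs.tail :=
  PySem.List.slice_from_one xs

-- closed form for A's loop after the first element has been consumed
lemma countEpLoop_some (target : Int) (s : List Int) : ∀ (v acc : Int),
    countEpLoop target s (some v) acc
      = acc + ((v :: s).count target : Int)
          - (((v :: s).zip s).countP (fun p => p.1 == target && p.2 == target) : Int)
          - (if v = target then 1 else 0) := by
  induction s with
  | nil =>
    intro v acc
    by_cases hv : v = target <;> simp [countEpLoop, hv]
  | cons w rest ih =>
    intro v acc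
    show countEpLoop target rest (some w) _ = _
    rw [ih]
    simp only [List.count_cons, List.zip_cons_cons, List.countP_cons]
    by_cases hv : v = target <;> by_cases hw : w = target <;>
      simp [hv, hw] <;> omega

-- ===== VERDICT below (by name) =====

theorem count_episodes_spec : Claim_equal_count_episodes := by
  intro series target _
  unfold Spec_count_episodes count_episodes count_episodes_alt
  rw [slice_one_eq_tail]
  cases series with
  | nil => simp [countEpLoop]
  | cons v rest =>
    show countEpLoop target rest (some v) _ = _
    rw [countEpLoop_some]
    by_cases hv : v = target <;> simp [hv] <;> omega
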